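-- pv_equiv track=rewrite | github.com/web-casa/webcasa | scripts/appstore-batch-test/batch_test.py | _clean_empty_section
-- ===== SOURCE A (Python) =====
-- def _clean_empty_section(content: str, section_key: str) -> str:
--     """Remove a YAML section whose only child lines are blank/comments."""
--     lines = content.split("\n")
--     out: list[str] = []
--     i = 0
--     while i < len(lines):
--         trimmed = lines[i].strip()
--         if trimmed == section_key:
--             indent = len(lines[i]) - len(lines[i].lstrip(" \t"))
--             j = i + 1
--             has_content = False
--             while j < len(lines):
--                 child_trimmed = lines[j].strip()
--                 if child_trimmed == "" or child_trimmed.startswith("#"):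
--                     j += 1
--                     continue
--                 child_indent = len(lines[j]) - len(lines[j].lstrip(" \t"))
--                 if child_indent > indent:
--                     has_content = True
--                 break
--             if not has_content:
--                 # Skip the section header. Children (if any blank/comment) get
--                 # carried through naturally because we just continue.
--                 i += 1
--                 continue
--         out.append(lines[i])
--         i += 1
--     return "\n".join(out)
-- ===== SOURCE B (Python) =====
-- def _clean_empty_section(content: str, section_key: str) -> str:
--     """Remove a YAML section whose only child lines are blank/comments.
--
--     Single backward pass: next_content_indent tracks the indent of the
--     nearest following non-blank/non-comment line, replacing A's nested
--     forward lookahead.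
--     """
--     lines = content.split("\n")
--     kept_rev: list[str] = []
--     next_content_indent = None  # indent of nearest following content line
--     for line in reversed(lines):
--         trimmed = line.strip()
--         if trimmed == section_key:
--             indent = len(line) - len(line.lstrip(" \t"))
--             if next_content_indent is not None and next_content_indent > indent:
--                 kept_rev.append(line)
--         else:
--             kept_rev.append(line)
--         if trimmed != "" and not trimmed.startswith("#"):
--             next_content_indent = len(line) - len(line.lstrip(" \t"))
--     return "\n".join(reversed(kept_rev))
-- ===== Notes on version B (the rewrite author's own statement) =====
-- stated objective: alternative
-- what changed: Replaces A's nested forward lookahead (rescanning following lines for each matching header) with a single stateful backward pass that carries the indent of the nearest following non-blank/non-comment line.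
import Mathlib
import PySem

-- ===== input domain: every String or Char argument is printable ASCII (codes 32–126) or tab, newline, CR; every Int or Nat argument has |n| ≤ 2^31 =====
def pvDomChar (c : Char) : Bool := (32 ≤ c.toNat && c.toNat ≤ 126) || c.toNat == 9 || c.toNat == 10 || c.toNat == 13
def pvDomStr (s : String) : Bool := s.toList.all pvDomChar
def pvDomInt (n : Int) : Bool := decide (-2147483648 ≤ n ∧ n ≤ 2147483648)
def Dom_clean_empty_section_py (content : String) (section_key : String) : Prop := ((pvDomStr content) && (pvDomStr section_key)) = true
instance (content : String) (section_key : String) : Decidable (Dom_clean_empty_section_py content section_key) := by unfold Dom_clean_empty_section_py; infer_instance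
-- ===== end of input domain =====

-- B replaces A's nested forward lookahead with one stateful backward pass (objective: alternative decomposition, same cost).

-- ===== PORT A =====

-- shared helper: len(s) - len(s.lstrip(" \t")); exact, since lstrip(" \t") drops
-- precisely the longest prefix of ' '/'\t' characters
def pvIndent (l : List Char) : Nat :=
  l.length - (l.dropWhile (fun c => c == ' ' || c == '\t')).length

-- A's inner while loop (scan forward from j for the first non-blank/non-comment line)
def pvAHasContent (indent : Nat) : List (List Char) → Bool
  | [] => false
  | l :: rest =>
    let ct := PySem.Chars.strip l
    if ct = [] ∨ PySem.Chars.startswith ct ['#'] = true then pvAHasContent indent rest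
    else decide (pvIndent l > indent)

-- A's outer while loop (i advances by one each iteration)
def pvALoop (key : List Char) : List (List Char) → List (List Char)
  | [] => []
  | l :: rest =>
    if PySem.Chars.strip l = key then
      if pvAHasContent (pvIndent l) rest then l :: pvALoop key rest
      else pvALoop key rest
    else l :: pvALoop key rest

def clean_empty_section_py (content : String) (section_key : String) : String :=
  String.ofList (PySem.Chars.join ['\n']
    (pvALoop section_key.toList (PySem.Chars.splitOn content.toList ['\n'])))

-- ===== PORT B =====

-- one step of B's backward loop: state = (kept lines in reverse, next_content_indent)
def pvBStep (key : List Char) (st : List (List Char) × Option Nat) (l : List Char) :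
    List (List Char) × Option Nat :=
  let kept := st.1
  let ni := st.2
  let t := PySem.Chars.strip l
  let kept' :=
    if t = key then
      match ni with
      | some c => if pvIndent l < c then kept ++ [l] else kept
      | none => kept
    else kept ++ [l]
  let ni' := if t ≠ [] ∧ PySem.Chars.startswith t ['#'] = false then some (pvIndent l) else ni
  (kept', ni')

def clean_empty_section_py_alt (content : String) (section_key : String) : String :=
  let lines := PySem.Chars.splitOn content.toList ['\n']
  let res := lines.reverse.foldl (pvBStep section_key.toList) ([], none)
  String.ofList (PySem.Chars.join ['\n'] res.1.reverse)

-- ===== PRECONDITION & SPEC =====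
def Spec_clean_empty_section_py (content : String) (section_key : String) (out : String) : Prop := out = clean_empty_section_py_alt content section_key
instance (content : String) (section_key : String) (out : String) : Decidable (Spec_clean_empty_section_py content section_key out) := by unfold Spec_clean_empty_section_py; infer_instance

-- ===== CLAIM (what is proved, stated in full; the proofs are below) =====
def Claim_equal_clean_empty_section_py : Prop := ∀ (content : String) (section_key : String), Dom_clean_empty_section_py content section_key → Spec_clean_empty_section_py content section_key (clean_empty_section_py content section_key)

-- ===== LEMMAS AND PROOFS =====

-- indent of the first non-blank/non-comment line of the list, if any
def pvNci : List (List Char) → Option Nat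
  | [] => none
  | l :: rest =>
    let t := PySem.Chars.strip l
    if t = [] ∨ PySem.Chars.startswith t ['#'] = true then pvNci rest
    else some (pvIndent l)

theorem pvAHasContent_eq_nci (indent : Nat) (lines : List (List Char)) :
    pvAHasContent indent lines =
      (match pvNci lines with
       | some c => decide (indent < c)
       | none => false) := by
  induction lines with
  | nil => rfl
  | cons l rest ih =>
    simp only [pvAHasContent, pvNci]
    split_ifs with h
    · exact ih
    · rfl

theorem pvB_foldr (key : List Char) (lines : List (List Char)) :
    lines.foldr (fun l st => pvBStep key st l) ([], none) =
      ((pvALoop key lines).reverse, pvNci lines) := by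
  induction lines with
  | nil => rfl
  | cons l rest ih =>
    rw [List.foldr_cons, ih]
    by_cases hk : PySem.Chars.strip l = key <;>
      by_cases hb : PySem.Chars.strip l = [] ∨ PySem.Chars.startswith (PySem.Chars.strip l) ['#'] = true <;>
        cases h : pvNci rest <;>
          simp [pvBStep, pvALoop, pvNci, pvAHasContent_eq_nci, hk, hb, h] <;>
            first
            | tauto
            | (split_ifs <;> simp_all)
            | (intro h1 h2
               cases hb with
               | inl hb => exact absurd hb h1
               | inr hb => simp [hb] at h2)
            | (push Not at hb
               simpa [Bool.not_eq_true] using hb)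

-- ===== VERDICT (by name: the statement is the Claim_ definition above) =====
theorem clean_empty_section_py_spec : Claim_equal_clean_empty_section_py := by
  intro content section_key _
  unfold Spec_clean_empty_section_py clean_empty_section_py clean_empty_section_py_alt
  simp only [List.foldl_reverse, pvB_foldr, List.reverse_reverse]
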